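-- pv_equiv track=rewrite | github.com/impr25/satellite_track | Geeks_test.py | maxCities
-- ===== SOURCE A (Python) =====
-- rr = (-1,-1,-1, 0, 0, 1, 1, 1)
--
-- cc = (-1, 0, 1,-1, 1,-1, 0, 1)
--
-- def isValid(r,c,R,C):
--     return r>=0 and c>=0 and r<R and c<C
--
-- def DFS( grid, r, c, R, C, spiritual):
--     spiritual[r][c] = False
--     ret = 1
--
--     for i in range(8):
--         newR = r + rr[i]
--         newC = c + cc[i]
--         if isValid(newR, newC, R, C) and spiritual[newR][newC]:
--             ret += DFS( grid, newR, newC, R, C, spiritual )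
--
--     return ret
--
-- def maxCities(grid,n,m):
--     spiritual = [ [ False for _ in range(m) ] for _ in range(n) ]
--     for r in range(n):
--         for c in range(m):
--             if grid[r][c] == '*':
--                 for i in range(8):
--                     newR = r + rr[i]
--                     newC = c + cc[i]
--                     if isValid(newR, newC, n, m) and grid[newR][newC]=='.':
--                         spiritual[newR][newC] = True
--
--     ret = 0
--     for r in range(n):
--         for c in range(m):
--             if spiritual[r][c]:
--                 ret = max( ret, DFS( grid,r,c,n,m,spiritual ) )
--
--     return ret
-- ===== SOURCE B (Python) =====
-- # Same result, different data structure: instead of a boolean grid, B keeps the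
-- # spiritual cells in a set of (r, c) pairs (built by a per-cell neighbour check)
-- # and measures each component with an iterative flood fill over an explicit
-- # (cell, next-neighbour-index) frame stack that discards visited pairs from the
-- # set; no recursion and no 2-D array. Mutates only its own local set.
--
-- OFFSETS = [(-1, -1), (-1, 0), (-1, 1), (0, -1), (0, 1), (1, -1), (1, 0), (1, 1)]
--
-- def _flood(live, r, c):
--     live.discard((r, c))
--     count = 1
--     stack = [(r, c, 0)]
--     while stack:
--         cr, cc, i = stack.pop()
--         if i < 8:
--             stack.append((cr, cc, i + 1))
--             dr, dc = OFFSETS[i]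
--             p = (cr + dr, cc + dc)
--             if p in live:
--                 live.discard(p)
--                 count += 1
--                 stack.append((p[0], p[1], 0))
--     return count
--
-- def maxCities(grid, n, m):
--     live = set()
--     for r in range(n):
--         for c in range(m):
--             if grid[r][c] == '.' and any(grid[r + dr][c + dc] == '*'
--                                          for dr, dc in OFFSETS
--                                          if 0 <= r + dr < n and 0 <= c + dc < m):
--                 live.add((r, c))
--     best = 0
--     for r in range(n):
--         for c in range(m):
--             if (r, c) in live:
--                 best = max(best, _flood(live, r, c))
--     return best
-- ===== Notes on version B (the rewrite author's own statement) =====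
-- stated objective: alternative
-- what changed: B replaces the boolean spiritual grid and recursive DFS by a set of (r,c) coordinate pairs built with a per-cell neighbour check and an iterative flood fill over an explicit (cell,next-neighbour-index) stack that discards visited pairs from the set.
import Mathlib
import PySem

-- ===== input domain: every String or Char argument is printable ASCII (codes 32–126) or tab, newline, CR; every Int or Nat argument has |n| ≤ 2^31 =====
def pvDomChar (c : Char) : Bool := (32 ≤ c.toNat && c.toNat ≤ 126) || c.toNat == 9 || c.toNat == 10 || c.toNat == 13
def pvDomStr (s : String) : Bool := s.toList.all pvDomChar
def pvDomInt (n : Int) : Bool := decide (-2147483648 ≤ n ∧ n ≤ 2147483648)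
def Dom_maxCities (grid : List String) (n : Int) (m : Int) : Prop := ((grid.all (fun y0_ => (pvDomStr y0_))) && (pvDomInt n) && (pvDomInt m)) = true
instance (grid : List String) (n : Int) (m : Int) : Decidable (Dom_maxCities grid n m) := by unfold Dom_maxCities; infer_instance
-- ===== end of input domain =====

-- B keeps the spiritual cells in a set of (r,c) pairs (built by a per-cell neighbour
-- check) and flood-fills with an explicit frame stack instead of recursive DFS over a
-- boolean grid; same return value on Pre_. Both Pythons mutate only local state.

-- ===== PORT A =====

abbrev SGrid := List (List Bool)

-- grid[r][c], total form; every use below is bounds-guarded and Pre_ makes the reads in range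
def charAt (grid : List String) (r c : Int) : Char :=
  (PySem.List.pyGet? ((PySem.List.pyGet? grid r).getD "").toList c).getD ' '

-- spiritual[r][c], total form (False outside)
def sget (s : SGrid) (r c : Int) : Bool :=
  (PySem.List.pyGet? ((PySem.List.pyGet? s r).getD []) c).getD false

-- spiritual[r][c] = b; exact at every call site: all writes are guarded so that 0 ≤ r,c and in range
def sset (s : SGrid) (r c : Int) (b : Bool) : SGrid :=
  s.set r.toNat (((PySem.List.pyGet? s r).getD []).set c.toNat b)

def trueCount (s : SGrid) : Nat := (s.map (fun row => row.countP (fun b => b))).sum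

def rrOff : List Int := [-1, -1, -1, 0, 0, 1, 1, 1]
def ccOff : List Int := [-1, 0, 1, -1, 1, -1, 0, 1]

def isValidA (r c R C : Int) : Bool :=
  decide (r ≥ 0) && decide (c ≥ 0) && decide (r < R) && decide (c < C)

-- port of DFS; the loop over range(8) is the recursion on i, with the body of the
-- recursive DFS call (mark + loop from i = 0 with ret = 1) inlined at its call site.
-- 'fuel' is a pure totality guard (every call strictly decreases 9*trueCount s + (8 - i),
-- so the fuel supplied by DFSa below is never exhausted); it changes no computed value.
def goA (grid : List String) (R C : Int) (fuel : Nat) (r c : Int) (i : Nat) (ret : Int) (s : SGrid) :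
    Int × SGrid :=
  match fuel with
  | 0 => (ret, s)
  | fuel + 1 =>
    if 8 ≤ i then (ret, s)
    else
      let newR := r + rrOff.getD i 0
      let newC := c + ccOff.getD i 0
      if (isValidA newR newC R C && sget s newR newC) = true then
        let d := goA grid R C fuel newR newC 0 1 (sset s newR newC false)
        goA grid R C fuel r c (i + 1) (ret + d.1) d.2
      else
        goA grid R C fuel r c (i + 1) ret s

def DFSa (grid : List String) (r c R C : Int) (s : SGrid) : Int × SGrid :=
  goA grid R C (9 * trueCount (sset s r c false) + 9) r c 0 1 (sset s r c false)

def stampA (grid : List String) (n m : Int) (s : SGrid) (r c : Int) : SGrid :=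
  if charAt grid r c == '*' then
    (List.range 8).foldl (fun s i =>
      let newR := r + rrOff.getD i 0
      let newC := c + ccOff.getD i 0
      if isValidA newR newC n m && (charAt grid newR newC == '.') then sset s newR newC true
      else s) s
  else s

def spiritualA (grid : List String) (n m : Int) : SGrid :=
  (PySem.List.pyRange 0 n 1).foldl
    (fun s r => (PySem.List.pyRange 0 m 1).foldl (fun s c => stampA grid n m s r c) s)
    ((PySem.List.pyRange 0 n 1).map (fun _ => (PySem.List.pyRange 0 m 1).map (fun _ => false)))

def maxCities (grid : List String) (n : Int) (m : Int) : Int :=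
  ((PySem.List.pyRange 0 n 1).foldl (fun (p : Int × SGrid) r =>
      (PySem.List.pyRange 0 m 1).foldl (fun (p : Int × SGrid) c =>
        if sget p.2 r c then
          (max p.1 (DFSa grid r c n m p.2).1, (DFSa grid r c n m p.2).2)
        else p) p)
    (0, spiritualA grid n m)).1

-- ===== PORT B =====

def offs : List (Int × Int) := [(-1, -1), (-1, 0), (-1, 1), (0, -1), (0, 1), (1, -1), (1, 0), (1, 1)]

-- the while-loop over the explicit frame stack; visited cells leave the set.
-- 'fuel' is a pure totality guard (every iteration strictly decreases
-- 9*live.length + sum of per-frame budgets, so the fuel supplied by floodB below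
-- is never exhausted); it changes no computed value.
def loopB (fuel : Nat) (live : PySem.Set (Int × Int)) (stk : List (Int × Int × Nat)) (cnt : Int) :
    Int × PySem.Set (Int × Int) :=
  match fuel, stk with
  | _, [] => (cnt, live)
  | 0, _ => (cnt, live)
  | fuel + 1, (cr, cc, i) :: rest =>
    if i < 8 then
      let p := (cr + (offs.getD i (0, 0)).1, cc + (offs.getD i (0, 0)).2)
      if PySem.Set.contains live p then
        loopB fuel (PySem.Set.discard live p) ((p.1, p.2, 0) :: (cr, cc, i + 1) :: rest) (cnt + 1)
      else
        loopB fuel live ((cr, cc, i + 1) :: rest) cnt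
    else
      loopB fuel live rest cnt

def floodB (live : PySem.Set (Int × Int)) (r c : Int) : Int × PySem.Set (Int × Int) :=
  loopB (9 * (PySem.Set.discard live (r, c)).length + 10)
    (PySem.Set.discard live (r, c)) [(r, c, 0)] 1

-- the per-cell condition of B's set-comprehension (the genexp's 'if' is the filter)
def condB (grid : List String) (n m : Int) (r c : Int) : Bool :=
  (charAt grid r c == '.') &&
    ((offs.filter (fun d => decide (0 ≤ r + d.1) && decide (r + d.1 < n) &&
        decide (0 ≤ c + d.2) && decide (c + d.2 < m))).any
      (fun d => charAt grid (r + d.1) (c + d.2) == '*'))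

def liveB (grid : List String) (n m : Int) : PySem.Set (Int × Int) :=
  (PySem.List.pyRange 0 n 1).foldl (fun L r =>
    (PySem.List.pyRange 0 m 1).foldl (fun L c =>
      if condB grid n m r c then PySem.Set.add L (r, c) else L) L) PySem.Set.empty

def maxCities_alt (grid : List String) (n : Int) (m : Int) : Int :=
  ((PySem.List.pyRange 0 n 1).foldl (fun (p : Int × PySem.Set (Int × Int)) r =>
      (PySem.List.pyRange 0 m 1).foldl (fun (p : Int × PySem.Set (Int × Int)) c =>
        if PySem.Set.contains p.2 (r, c) then
          (max p.1 (floodB p.2 r c).1, (floodB p.2 r c).2)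
        else p) p)
    (0, liveB grid n m)).1

-- ===== PRECONDITION & SPEC =====

-- Pre_ excludes exactly the inputs where Python A raises IndexError:
-- with positive n and m it reads grid[r][c] for every r < n, c < m.
def Pre_maxCities (grid : List String) (n : Int) (m : Int) : Prop :=
  0 < n ∧ 0 < m → n ≤ (grid.length : Int) ∧ ∀ s ∈ grid.take n.toNat, m ≤ (s.length : Int)
instance (grid : List String) (n : Int) (m : Int) : Decidable (Pre_maxCities grid n m) := by
  unfold Pre_maxCities; infer_instance

def pvWitness_maxCities : List String × Int × Int := ([".*", ".."], 2, 2)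

def Spec_maxCities (grid : List String) (n : Int) (m : Int) (out : Int) : Prop := out = maxCities_alt grid n m
instance (grid : List String) (n : Int) (m : Int) (out : Int) : Decidable (Spec_maxCities grid n m out) := by unfold Spec_maxCities; infer_instance

-- ===== CLAIM (what is proved, stated in full; the proofs are below) =====
def Claim_equal_maxCities : Prop := ∀ (grid : List String) (n : Int) (m : Int), Dom_maxCities grid n m → Pre_maxCities grid n m → Spec_maxCities grid n m (maxCities grid n m)

-- ===== LEMMAS AND PROOFS =====

-- facts feeding the fuel-sufficiency arguments
theorem countP_id_set_false_lt {row : List Bool} {j : Nat} (h : row[j]? = some true) :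
    (row.set j false).countP (fun b => b) < row.countP (fun b => b) := by
  induction row generalizing j with
  | nil => simp at h
  | cons x t ih =>
    cases j with
    | zero => simp at h; subst h; simp
    | succ j =>
      have := ih (j := j) (by simpa using h)
      simp only [List.set, List.countP_cons]
      omega

theorem trueCount_set_lt : ∀ (s : SGrid) (i : Nat) (row : List Bool), s[i]? = some row →
    ∀ j, row[j]? = some true → trueCount (s.set i (row.set j false)) < trueCount s := by
  intro s
  induction s with
  | nil => intro i row h; simp at h
  | cons r t ih =>
    intro i row h j hj
    cases i with
    | zero =>
      simp at h; subst h
      have := countP_id_set_false_lt hj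
      simp only [List.set, trueCount, List.map_cons, List.sum_cons]
      omega
    | succ i =>
      have := ih i row (by simpa using h) j hj
      simp only [List.set, trueCount, List.map_cons, List.sum_cons] at *
      omega

theorem trueCount_sset_false_lt {s : SGrid} {a b : Int} (ha : 0 ≤ a) (hb : 0 ≤ b)
    (h : sget s a b = true) : trueCount (sset s a b false) < trueCount s := by
  unfold sget at h
  rw [PySem.List.pyGet?_of_nonneg s ha] at h
  rcases hrow : s[a.toNat]? with _ | row
  · simp [hrow, PySem.List.pyGet?] at h
  · rw [hrow] at h
    simp only [Option.getD_some] at h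
    rw [PySem.List.pyGet?_of_nonneg row hb] at h
    rcases hv : row[b.toNat]? with _ | v
    · simp [hv] at h
    · rw [hv] at h; simp at h; subst h
      have := trueCount_set_lt s a.toNat row hrow b.toNat hv
      unfold sset
      rwa [PySem.List.pyGet?_of_nonneg s ha, hrow, Option.getD_some]

theorem guardA_parts {a b R C : Int} {s : SGrid}
    (h : (isValidA a b R C && sget s a b) = true) :
    0 ≤ a ∧ 0 ≤ b ∧ a < R ∧ b < C ∧ sget s a b = true := by
  simp only [isValidA, Bool.and_eq_true, decide_eq_true_eq, ge_iff_le] at h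
  exact ⟨h.1.1.1.1, h.1.1.1.2, h.1.1.2, h.1.2, h.2⟩

theorem discard_len_lt {L : List (Int × Int)} {p : Int × Int} (h : p ∈ L) :
    (PySem.Set.discard L p).length < L.length := by
  unfold PySem.Set.discard
  simp
  exact h

-- goA never increases the number of true cells
theorem goA_le : ∀ (fuel : Nat) (grid : List String) (R C : Int) (s : SGrid) (i : Nat) (r c ret : Int),
    trueCount (goA grid R C fuel r c i ret s).2 ≤ trueCount s := by
  intro fuel
  induction fuel with
  | zero => intro grid R C s i r c ret; exact Nat.le_refl _
  | succ f ih =>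
    intro grid R C s i r c ret
    rw [goA]
    by_cases hi : 8 ≤ i
    · rw [if_pos hi]
    · rw [if_neg hi]
      dsimp only
      by_cases hg : (isValidA (r + rrOff.getD i 0) (c + ccOff.getD i 0) R C &&
          sget s (r + rrOff.getD i 0) (c + ccOff.getD i 0)) = true
      · rw [if_pos hg]
        have hp := guardA_parts hg
        have h1 := trueCount_sset_false_lt hp.1 hp.2.1 hp.2.2.2.2
        have h2 := ih grid R C (sset s (r + rrOff.getD i 0) (c + ccOff.getD i 0) false) 0
          (r + rrOff.getD i 0) (c + ccOff.getD i 0) 1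
        have h3 := ih grid R C
          (goA grid R C f (r + rrOff.getD i 0) (c + ccOff.getD i 0) 0 1
            (sset s (r + rrOff.getD i 0) (c + ccOff.getD i 0) false)).2 (i + 1) r c
          (ret + (goA grid R C f (r + rrOff.getD i 0) (c + ccOff.getD i 0) 0 1
            (sset s (r + rrOff.getD i 0) (c + ccOff.getD i 0) false)).1)
        omega
      · rw [if_neg hg]
        exact ih grid R C s (i + 1) r c ret

-- above the natural measure, the fuel value is irrelevant
theorem goA_fuel : ∀ (f g : Nat) (grid : List String) (R C : Int) (s : SGrid) (i : Nat) (r c ret : Int),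
    9 * trueCount s + (8 - i) < f → 9 * trueCount s + (8 - i) < g →
    goA grid R C f r c i ret s = goA grid R C g r c i ret s := by
  intro f
  induction f with
  | zero => intro g grid R C s i r c ret hf; omega
  | succ f ih =>
    intro g grid R C s i r c ret hf hg
    rcases g with _ | g
    · omega
    · rw [goA, goA]
      by_cases hi : 8 ≤ i
      · rw [if_pos hi, if_pos hi]
      · rw [if_neg hi, if_neg hi]
        dsimp only
        by_cases hgd : (isValidA (r + rrOff.getD i 0) (c + ccOff.getD i 0) R C &&
            sget s (r + rrOff.getD i 0) (c + ccOff.getD i 0)) = true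
        · rw [if_pos hgd, if_pos hgd]
          have hp := guardA_parts hgd
          have hlt := trueCount_sset_false_lt hp.1 hp.2.1 hp.2.2.2.2
          have e1 : goA grid R C f (r + rrOff.getD i 0) (c + ccOff.getD i 0) 0 1
                (sset s (r + rrOff.getD i 0) (c + ccOff.getD i 0) false) =
              goA grid R C g (r + rrOff.getD i 0) (c + ccOff.getD i 0) 0 1
                (sset s (r + rrOff.getD i 0) (c + ccOff.getD i 0) false) :=
            ih g grid R C _ 0 _ _ 1 (by omega) (by omega)
          rw [e1]
          have hle := goA_le g grid R C
            (sset s (r + rrOff.getD i 0) (c + ccOff.getD i 0) false) 0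
            (r + rrOff.getD i 0) (c + ccOff.getD i 0) 1
          exact ih g grid R C _ (i + 1) r c _ (by omega) (by omega)
        · rw [if_neg hgd, if_neg hgd]
          exact ih g grid R C s (i + 1) r c ret (by omega) (by omega)

-- proof-side wrapper: goA with its canonical (always sufficient) fuel
def goARun (grid : List String) (R C r c : Int) (i : Nat) (ret : Int) (s : SGrid) : Int × SGrid :=
  goA grid R C (9 * trueCount s + 9) r c i ret s

theorem DFSa_eq (grid : List String) (r c R C : Int) (s : SGrid) :
    DFSa grid r c R C s = goARun grid R C r c 0 1 (sset s r c false) := rfl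

theorem goARun_base (grid : List String) (R C r c ret : Int) (i : Nat) (s : SGrid) (hi : 8 ≤ i) :
    goARun grid R C r c i ret s = (ret, s) := by
  unfold goARun
  rw [show 9 * trueCount s + 9 = (9 * trueCount s + 8) + 1 from rfl, goA, if_pos hi]

theorem goARun_false (grid : List String) (R C r c ret : Int) (i : Nat) (s : SGrid) (hi : ¬ 8 ≤ i)
    (hg : ¬ (isValidA (r + rrOff.getD i 0) (c + ccOff.getD i 0) R C && sget s (r + rrOff.getD i 0) (c + ccOff.getD i 0)) = true) :
    goARun grid R C r c i ret s = goARun grid R C r c (i + 1) ret s := by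
  unfold goARun
  rw [show 9 * trueCount s + 9 = (9 * trueCount s + 8) + 1 from rfl, goA, if_neg hi]
  dsimp only
  rw [if_neg hg]
  exact goA_fuel _ _ grid R C s (i + 1) r c ret (by omega) (by omega)

theorem goARun_true (grid : List String) (R C r c ret : Int) (i : Nat) (s : SGrid) (hi : ¬ 8 ≤ i)
    (hg : (isValidA (r + rrOff.getD i 0) (c + ccOff.getD i 0) R C && sget s (r + rrOff.getD i 0) (c + ccOff.getD i 0)) = true) :
    goARun grid R C r c i ret s =
      goARun grid R C r c (i + 1)
        (ret + (goARun grid R C (r + rrOff.getD i 0) (c + ccOff.getD i 0) 0 1 (sset s (r + rrOff.getD i 0) (c + ccOff.getD i 0) false)).1)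
        (goARun grid R C (r + rrOff.getD i 0) (c + ccOff.getD i 0) 0 1 (sset s (r + rrOff.getD i 0) (c + ccOff.getD i 0) false)).2 := by
  unfold goARun
  rw [show 9 * trueCount s + 9 = (9 * trueCount s + 8) + 1 from rfl, goA, if_neg hi]
  dsimp only
  rw [if_pos hg]
  have hp := guardA_parts hg
  have hlt := trueCount_sset_false_lt hp.1 hp.2.1 hp.2.2.2.2
  have e1 : goA grid R C (9 * trueCount s + 8) (r + rrOff.getD i 0) (c + ccOff.getD i 0) 0 1
        (sset s (r + rrOff.getD i 0) (c + ccOff.getD i 0) false) =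
      goA grid R C (9 * trueCount (sset s (r + rrOff.getD i 0) (c + ccOff.getD i 0) false) + 9)
        (r + rrOff.getD i 0) (c + ccOff.getD i 0) 0 1
        (sset s (r + rrOff.getD i 0) (c + ccOff.getD i 0) false) :=
    goA_fuel _ _ grid R C _ 0 _ _ 1 (by omega) (by omega)
  rw [e1]
  have hle := goA_le (9 * trueCount (sset s (r + rrOff.getD i 0) (c + ccOff.getD i 0) false) + 9)
    grid R C (sset s (r + rrOff.getD i 0) (c + ccOff.getD i 0) false) 0
    (r + rrOff.getD i 0) (c + ccOff.getD i 0) 1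
  exact goA_fuel _ _ grid R C _ (i + 1) r c _ (by omega) (by omega)

theorem goARun_shift (grid : List String) (R C : Int) :
    ∀ (j i : Nat), 8 - i ≤ j → ∀ (s : SGrid) (r c : Int) (ret : Int),
      goARun grid R C r c i ret s =
        (ret + (goARun grid R C r c i 0 s).1, (goARun grid R C r c i 0 s).2) := by
  intro j
  induction j with
  | zero =>
    intro i hij s r c ret
    have hi : 8 ≤ i := by omega
    rw [goARun_base grid R C r c ret i s hi, goARun_base grid R C r c 0 i s hi]
    simp
  | succ j ih =>
    intro i hij s r c ret
    by_cases hi : 8 ≤ i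
    · rw [goARun_base grid R C r c ret i s hi, goARun_base grid R C r c 0 i s hi]; simp
    · by_cases hg : (isValidA (r + rrOff.getD i 0) (c + ccOff.getD i 0) R C && sget s (r + rrOff.getD i 0) (c + ccOff.getD i 0)) = true
      · rw [goARun_true grid R C r c ret i s hi hg, goARun_true grid R C r c 0 i s hi hg]
        generalize (goARun grid R C (r + rrOff.getD i 0) (c + ccOff.getD i 0) 0 1
          (sset s (r + rrOff.getD i 0) (c + ccOff.getD i 0) false)) = d
        rw [ih (i+1) (by omega) d.2 r c (ret + d.1),
            ih (i+1) (by omega) d.2 r c (0 + d.1)]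
        simp [Prod.ext_iff]; omega
      · rw [goARun_false grid R C r c ret i s hi hg, goARun_false grid R C r c 0 i s hi hg]
        exact ih (i+1) (by omega) s r c ret

-- the natural measure of B's loop state
def nuM (live : List (Int × Int)) (stk : List (Int × Int × Nat)) : Nat :=
  9 * live.length + (stk.map (fun t => 9 - min t.2.2 8)).sum

theorem loopB_nil_all (f : Nat) (live : PySem.Set (Int × Int)) (cnt : Int) :
    loopB f live [] cnt = (cnt, live) := by
  cases f <;> rfl

theorem loopB_fuel : ∀ (f g : Nat) (live : PySem.Set (Int × Int)) (stk : List (Int × Int × Nat)) (cnt : Int),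
    nuM live stk < f → nuM live stk < g → loopB f live stk cnt = loopB g live stk cnt := by
  intro f
  induction f with
  | zero => intro g live stk cnt hf; omega
  | succ f ih =>
    intro g live stk cnt hf hg
    rcases stk with _ | ⟨⟨cr, cc, i⟩, rest⟩
    · rw [loopB_nil_all, loopB_nil_all]
    · rcases g with _ | g
      · omega
      · rw [loopB, loopB]
        have hf' : 9 * live.length + ((9 - min i 8) + (rest.map (fun t => 9 - min t.2.2 8)).sum) < f + 1 := by
          simpa [nuM] using hf
        have hg' : 9 * live.length + ((9 - min i 8) + (rest.map (fun t => 9 - min t.2.2 8)).sum) < g + 1 := by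
          simpa [nuM] using hg
        by_cases hi : i < 8
        · rw [if_pos hi, if_pos hi]
          dsimp only
          by_cases hc : PySem.Set.contains live (cr + (offs.getD i (0, 0)).1, cc + (offs.getD i (0, 0)).2) = true
          · rw [if_pos hc, if_pos hc]
            have hd := discard_len_lt ((PySem.Set.contains_iff _ _).mp hc)
            apply ih
            · simp only [nuM, List.map_cons, List.sum_cons]
              omega
            · simp only [nuM, List.map_cons, List.sum_cons]
              omega
          · rw [if_neg hc, if_neg hc]
            apply ih
            · simp only [nuM, List.map_cons, List.sum_cons]
              omega
            · simp only [nuM, List.map_cons, List.sum_cons]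
              omega
        · rw [if_neg hi, if_neg hi]
          apply ih
          · simp only [nuM]
            omega
          · simp only [nuM]
            omega

-- proof-side wrapper: loopB with its canonical (always sufficient) fuel
def loopRun (live : PySem.Set (Int × Int)) (stk : List (Int × Int × Nat)) (cnt : Int) :
    Int × PySem.Set (Int × Int) :=
  loopB (nuM live stk + 1) live stk cnt

theorem floodB_eq (live : PySem.Set (Int × Int)) (r c : Int) :
    floodB live r c = loopRun (PySem.Set.discard live (r, c)) [(r, c, 0)] 1 := by
  unfold floodB loopRun
  apply loopB_fuel <;> (simp only [nuM, List.map_cons, List.map_nil, List.sum_cons, List.sum_nil]; omega)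

theorem loopRun_nil (live : PySem.Set (Int × Int)) (cnt : Int) : loopRun live [] cnt = (cnt, live) :=
  loopB_nil_all _ live cnt

theorem loopRun_pop (live : PySem.Set (Int × Int)) (cr cc : Int) (i : Nat)
    (rest : List (Int × Int × Nat)) (cnt : Int) (hi : ¬ i < 8) :
    loopRun live ((cr, cc, i) :: rest) cnt = loopRun live rest cnt := by
  unfold loopRun
  rw [loopB, if_neg hi]
  apply loopB_fuel <;> (simp only [nuM, List.map_cons, List.sum_cons]; omega)

theorem loopRun_false (live : PySem.Set (Int × Int)) (cr cc : Int) (i : Nat)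
    (rest : List (Int × Int × Nat)) (cnt : Int) (hi : i < 8)
    (hg : ¬ PySem.Set.contains live (cr + (offs.getD i (0, 0)).1, cc + (offs.getD i (0, 0)).2) = true) :
    loopRun live ((cr, cc, i) :: rest) cnt = loopRun live ((cr, cc, i + 1) :: rest) cnt := by
  unfold loopRun
  rw [loopB, if_pos hi]
  dsimp only
  rw [if_neg hg]
  apply loopB_fuel <;> (simp only [nuM, List.map_cons, List.sum_cons]; omega)

theorem loopRun_true (live : PySem.Set (Int × Int)) (cr cc : Int) (i : Nat)
    (rest : List (Int × Int × Nat)) (cnt : Int) (hi : i < 8)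
    (hg : PySem.Set.contains live (cr + (offs.getD i (0, 0)).1, cc + (offs.getD i (0, 0)).2) = true) :
    loopRun live ((cr, cc, i) :: rest) cnt =
      loopRun (PySem.Set.discard live (cr + (offs.getD i (0, 0)).1, cc + (offs.getD i (0, 0)).2))
        ((cr + (offs.getD i (0, 0)).1, cc + (offs.getD i (0, 0)).2, 0) :: (cr, cc, i + 1) :: rest) (cnt + 1) := by
  unfold loopRun
  rw [loopB, if_pos hi]
  dsimp only
  rw [if_pos hg]
  have hd := discard_len_lt ((PySem.Set.contains_iff _ _).mp hg)
  apply loopB_fuel <;> (simp only [nuM, List.map_cons, List.sum_cons]; omega)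

theorem offs_fst : ∀ i : Nat, (offs.getD i (0, 0)).1 = rrOff.getD i 0 := by
  intro i
  rcases i with _|_|_|_|_|_|_|_|i <;> simp [offs, rrOff, List.getD]

theorem offs_snd : ∀ i : Nat, (offs.getD i (0, 0)).2 = ccOff.getD i 0 := by
  intro i
  rcases i with _|_|_|_|_|_|_|_|i <;> simp [offs, ccOff, List.getD]

-- shape and cell bookkeeping
def cell (s : SGrid) (x y : Nat) : Bool := (s.getD x []).getD y false

def Shaped (s : SGrid) (n' m' : Nat) : Prop := s.length = n' ∧ ∀ row ∈ s, row.length = m'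

theorem sget_eq_cell (s : SGrid) (x y : Int) (hx : 0 ≤ x) (hy : 0 ≤ y) :
    sget s x y = cell s x.toNat y.toNat := by
  unfold sget cell
  rw [PySem.List.pyGet?_of_nonneg s hx]
  rcases h : s[x.toNat]? with _ | row
  · simp [List.getD_eq_getElem?_getD, h, PySem.List.pyGet?]
  · simp only [Option.getD_some, List.getD_eq_getElem?_getD, h]
    rw [PySem.List.pyGet?_of_nonneg row hy]

theorem shaped_sset {s : SGrid} {n' m' : Nat} (hs : Shaped s n' m') (a b : Int) (v : Bool)
    (ha : 0 ≤ a) : Shaped (sset s a b v) n' m' := by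
  unfold sset
  rw [PySem.List.pyGet?_of_nonneg s ha]
  by_cases h : a.toNat < s.length
  · refine ⟨by simpa using hs.1, ?_⟩
    intro row hrow
    rcases List.mem_or_eq_of_mem_set hrow with h1 | h2
    · exact hs.2 row h1
    · subst h2
      rw [List.length_set]
      rw [List.getElem?_eq_getElem h]
      simpa using hs.2 _ (List.getElem_mem h)
  · rw [List.set_eq_of_length_le (by omega)]
    exact hs

theorem cell_sset {s : SGrid} (a b : Int) (v : Bool) (x y : Nat) (ha : 0 ≤ a) (_hb : 0 ≤ b) :
    cell (sset s a b v) x y =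
      if a.toNat = x ∧ b.toNat = y ∧ x < s.length ∧ y < (s.getD x []).length then v
      else cell s x y := by
  unfold cell sset
  rw [PySem.List.pyGet?_of_nonneg s ha]
  by_cases hax : a.toNat = x <;> by_cases hxl : x < s.length <;>
    by_cases hby : b.toNat = y <;> by_cases hyl : y < (s[x]?.getD []).length <;>
    simp_all [List.getD_eq_getElem?_getD]

theorem rowlen_of_shaped {s : SGrid} {n' m' : Nat} (hs : Shaped s n' m') {x : Nat}
    (hx : x < n') : (s.getD x []).length = m' := by
  rw [List.getD_eq_getElem?_getD, List.getElem?_eq_getElem (by rw [hs.1]; exact hx)]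
  exact hs.2 _ (List.getElem_mem _)

theorem cell_foldl_or {α : Type} (step : SGrid → α → SGrid) (F : α → Bool) (n' m' x y : Nat)
    (hshape : ∀ s a, Shaped s n' m' → Shaped (step s a) n' m')
    (hstep : ∀ s a, Shaped s n' m' → cell (step s a) x y = (cell s x y || F a)) :
    ∀ (L : List α) (s : SGrid), Shaped s n' m' →
      cell (L.foldl step s) x y = (cell s x y || L.any F) := by
  intro L
  induction L with
  | nil => intro s _; simp
  | cons a L ih =>
    intro s hs
    rw [List.foldl_cons, ih (step s a) (hshape s a hs), hstep s a hs]
    simp [Bool.or_assoc]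

theorem shaped_foldl {α : Type} (step : SGrid → α → SGrid) (n' m' : Nat)
    (hshape : ∀ s a, Shaped s n' m' → Shaped (step s a) n' m') :
    ∀ (L : List α) (s : SGrid), Shaped s n' m' → Shaped (L.foldl step s) n' m' := by
  intro L
  induction L with
  | nil => intro s hs; simpa using hs
  | cons a L ih => intro s hs; exact ih (step s a) (hshape s a hs)

-- which cells the star scan at (r,c) turns on
def stampHit (grid : List String) (n m : Int) (r c : Int) (x y : Nat) : Bool :=
  (charAt grid r c == '*') && ((List.range 8).any (fun i =>
    isValidA (r + rrOff.getD i 0) (c + ccOff.getD i 0) n m &&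
    (charAt grid (r + rrOff.getD i 0) (c + ccOff.getD i 0) == '.') &&
    decide (r + rrOff.getD i 0 = (x : Int) ∧ c + ccOff.getD i 0 = (y : Int))))

theorem isValidA_parts {a b R C : Int} (h : isValidA a b R C = true) :
    0 ≤ a ∧ 0 ≤ b ∧ a < R ∧ b < C := by
  simp only [isValidA, Bool.and_eq_true, decide_eq_true_eq, ge_iff_le] at h
  exact ⟨h.1.1.1, h.1.1.2, h.1.2, h.2⟩

theorem shaped_stampA (grid : List String) (n m : Int) (s : SGrid) (r c : Int)
    (hs : Shaped s n.toNat m.toNat) : Shaped (stampA grid n m s r c) n.toNat m.toNat := by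
  unfold stampA
  by_cases hstar : charAt grid r c == '*'
  · rw [if_pos hstar]
    apply shaped_foldl _ _ _ _ _ s hs
    intro s' i hs'
    dsimp only
    by_cases hg : (isValidA (r + rrOff.getD i 0) (c + ccOff.getD i 0) n m &&
        (charAt grid (r + rrOff.getD i 0) (c + ccOff.getD i 0) == '.')) = true
    · rw [if_pos hg]
      exact shaped_sset hs' _ _ _ (isValidA_parts ((Bool.and_eq_true _ _).mp hg).1).1
    · rw [if_neg hg]; exact hs'
  · rw [if_neg hstar]; exact hs

theorem cell_stampA (grid : List String) (n m : Int) (s : SGrid) (r c : Int) (x y : Nat)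
    (hs : Shaped s n.toNat m.toNat) (hx : x < n.toNat) (hy : y < m.toNat) :
    cell (stampA grid n m s r c) x y = (cell s x y || stampHit grid n m r c x y) := by
  unfold stampA stampHit
  by_cases hstar : charAt grid r c == '*'
  · rw [if_pos hstar]
    simp only [hstar, Bool.true_and]
    apply cell_foldl_or _ _ n.toNat m.toNat x y ?_ ?_ _ s hs
    · intro s' i hs'
      dsimp only
      by_cases hg : (isValidA (r + rrOff.getD i 0) (c + ccOff.getD i 0) n m &&
          (charAt grid (r + rrOff.getD i 0) (c + ccOff.getD i 0) == '.')) = true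
      · rw [if_pos hg]
        exact shaped_sset hs' _ _ _ (isValidA_parts ((Bool.and_eq_true _ _).mp hg).1).1
      · rw [if_neg hg]; exact hs'
    · intro s' i hs'
      dsimp only
      by_cases hg : (isValidA (r + rrOff.getD i 0) (c + ccOff.getD i 0) n m &&
          (charAt grid (r + rrOff.getD i 0) (c + ccOff.getD i 0) == '.')) = true
      · rw [if_pos hg]
        have hv := isValidA_parts ((Bool.and_eq_true _ _).mp hg).1
        rw [cell_sset _ _ _ _ _ hv.1 hv.2.1]
        have hrow : (s'.getD x []).length = m.toNat := rowlen_of_shaped hs' hx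
        by_cases hhit : (r + rrOff.getD i 0).toNat = x ∧ (c + ccOff.getD i 0).toNat = y
        · rw [if_pos ⟨hhit.1, hhit.2, by rw [hs'.1]; exact hx, by rw [hrow]; exact hy⟩]
          have he : decide (r + rrOff.getD i 0 = (x : Int) ∧ c + ccOff.getD i 0 = (y : Int)) = true := by
            rw [decide_eq_true_eq]; omega
          rw [hg, he]
          simp
        · rw [if_neg (by rw [hrow]; tauto)]
          have he : decide (r + rrOff.getD i 0 = (x : Int) ∧ c + ccOff.getD i 0 = (y : Int)) = false := by
            rw [decide_eq_false_iff_not]; omega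
          rw [he]
          simp
      · rw [if_neg hg]
        rw [Bool.and_eq_true] at hg
        rcases not_and_or.mp hg with h1 | h1 <;> rw [Bool.not_eq_true] at h1 <;> rw [h1] <;> simp
  · rw [if_neg hstar]
    rw [Bool.not_eq_true] at hstar
    rw [hstar]
    simp

theorem cell_init (n m : Int) (x y : Nat) :
    cell ((PySem.List.pyRange 0 n 1).map (fun _ => (PySem.List.pyRange 0 m 1).map (fun _ => false))) x y = false := by
  simp only [cell, List.getD_eq_getElem?_getD]
  simp [List.getElem?_replicate]
  split_ifs <;> simp

theorem shaped_init (n m : Int) :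
    Shaped ((PySem.List.pyRange 0 n 1).map (fun _ => (PySem.List.pyRange 0 m 1).map (fun _ => false))) n.toNat m.toNat := by
  constructor
  · simp [PySem.List.length_pyRange_one]
  · intro row hrow
    rcases List.mem_map.mp hrow with ⟨_, _, hr⟩
    rw [← hr]
    simp [PySem.List.length_pyRange_one]

theorem shaped_spiritualA (grid : List String) (n m : Int) :
    Shaped (spiritualA grid n m) n.toNat m.toNat := by
  unfold spiritualA
  apply shaped_foldl _ _ _ _ _ _ (shaped_init n m)
  intro s r hs
  exact shaped_foldl _ _ _ (fun s c h => shaped_stampA grid n m s r c h) _ s hs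

theorem cell_spiritualA (grid : List String) (n m : Int) (x y : Nat)
    (hx : x < n.toNat) (hy : y < m.toNat) :
    cell (spiritualA grid n m) x y =
      (PySem.List.pyRange 0 n 1).any (fun r =>
        (PySem.List.pyRange 0 m 1).any (fun c => stampHit grid n m r c x y)) := by
  unfold spiritualA
  rw [cell_foldl_or _ _ n.toNat m.toNat x y
        (fun s r hs => shaped_foldl _ _ _ (fun s c h => shaped_stampA grid n m s r c h) _ s hs)
        (fun s r hs => cell_foldl_or _ _ n.toNat m.toNat x y
          (fun s c h => shaped_stampA grid n m s r c h)
          (fun s c h => cell_stampA grid n m s r c x y h hx hy) _ s hs)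
        _ _ (shaped_init n m)]
  rw [cell_init]
  simp only [Bool.false_or]

theorem offs_any (f : Int × Int → Bool) :
    offs.any f = (List.range 8).any (fun i => f (rrOff.getD i 0, ccOff.getD i 0)) := by
  simp [offs, rrOff, ccOff, List.range_succ, List.getD]

theorem off_neg : ∀ i, i < 8 → rrOff.getD (7 - i) 0 = -rrOff.getD i 0 ∧ ccOff.getD (7 - i) 0 = -ccOff.getD i 0 := by decide

-- the stamped grid agrees with B's per-cell condition on in-range cells
theorem cond_eq (grid : List String) (n m : Int) (x y : Nat)
    (hx : x < n.toNat) (hy : y < m.toNat) :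
    cell (spiritualA grid n m) x y = condB grid n m (x : Int) (y : Int) := by
  rw [cell_spiritualA grid n m x y hx hy]
  unfold condB
  rw [List.any_filter, offs_any]
  rw [Bool.eq_iff_iff]
  simp only [List.any_eq_true, PySem.List.mem_pyRange_one, List.mem_range, stampHit, isValidA,
    Bool.and_eq_true, decide_eq_true_eq, beq_iff_eq, ge_iff_le]
  constructor
  · rintro ⟨r, ⟨hr0, hrn⟩, c, ⟨hc0, hcm⟩, hstar, i, hi8, ⟨⟨⟨⟨hv1a, hv1b⟩, hv2⟩, hv3⟩, hdot⟩, hex, hey⟩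
    have hneg := off_neg i hi8
    refine ⟨by rw [← hex, ← hey]; exact hdot, 7 - i, by omega,
            ⟨⟨⟨by omega, by omega⟩, by omega⟩, by omega⟩, ?_⟩
    have e1 : (x : Int) + rrOff.getD (7 - i) 0 = r := by omega
    have e2 : (y : Int) + ccOff.getD (7 - i) 0 = c := by omega
    rw [e1, e2]; exact hstar
  · rintro ⟨hdot, i, hi8, ⟨⟨⟨hv1, hv2⟩, hv3⟩, hv4⟩, hstar⟩
    have hneg := off_neg i hi8
    have e1 : (x : Int) + rrOff.getD i 0 + rrOff.getD (7 - i) 0 = (x : Int) := by omega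
    have e2 : (y : Int) + ccOff.getD i 0 + ccOff.getD (7 - i) 0 = (y : Int) := by omega
    refine ⟨(x : Int) + rrOff.getD i 0, ⟨hv1, hv2⟩, (y : Int) + ccOff.getD i 0, ⟨hv3, hv4⟩, hstar,
            7 - i, by omega, ⟨⟨⟨⟨by omega, by omega⟩, by omega⟩, by omega⟩, ?_⟩, by omega, by omega⟩
    rw [e1, e2]; exact hdot

-- the simulation relation between A's boolean grid and B's coordinate set
def Corr (n m : Int) (s : SGrid) (L : List (Int × Int)) : Prop :=
  L.Nodup ∧ ∀ a b : Int, ((a, b) ∈ L ↔ 0 ≤ a ∧ a < n ∧ 0 ≤ b ∧ b < m ∧ sget s a b = true)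

theorem corr_guard {n m : Int} {s : SGrid} {L : List (Int × Int)} (hc : Corr n m s L)
    (a b : Int) : PySem.Set.contains L (a, b) = (isValidA a b n m && sget s a b) := by
  rw [Bool.eq_iff_iff, PySem.Set.contains_iff, hc.2 a b]
  simp only [isValidA, Bool.and_eq_true, decide_eq_true_eq, ge_iff_le]
  tauto

theorem corr_discard {n m : Int} {s : SGrid} {L : List (Int × Int)} {a b : Int}
    (hs : Shaped s n.toNat m.toNat) (hc : Corr n m s L) (hmem : (a, b) ∈ L) :
    Corr n m (sset s a b false) (PySem.Set.discard L (a, b)) := by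
  obtain ⟨hnd, hiff⟩ := hc
  have hb := (hiff a b).mp hmem
  refine ⟨PySem.Set.nodup_discard _ _ hnd, ?_⟩
  intro x y
  rw [PySem.Set.mem_discard, hiff x y]
  by_cases hxy : 0 ≤ x ∧ x < n ∧ 0 ≤ y ∧ y < m
  · rw [sget_eq_cell s x y hxy.1 hxy.2.2.1,
        sget_eq_cell (sset s a b false) x y hxy.1 hxy.2.2.1,
        cell_sset a b false x.toNat y.toNat hb.1 hb.2.2.1]
    have hxn : x.toNat < n.toNat := by omega
    have hrow : (s.getD x.toNat []).length = m.toNat := rowlen_of_shaped hs hxn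
    by_cases hhit : a.toNat = x.toNat ∧ b.toNat = y.toNat
    · rw [if_pos ⟨hhit.1, hhit.2, by rw [hs.1]; omega, by rw [hrow]; omega⟩]
      have : (x, y) = (a, b) := by
        rw [Prod.mk.injEq]; omega
      simp [this]
    · rw [if_neg (by rw [hs.1, hrow]; tauto)]
      have hne : (x, y) ≠ (a, b) := by
        rw [Ne, Prod.mk.injEq]; omega
      rw [← sget_eq_cell s x y hxy.1 hxy.2.2.1]
      tauto
  · constructor
    · rintro ⟨h1, _⟩; exact absurd ⟨h1.1, h1.2.1, h1.2.2.1, h1.2.2.2.1⟩ hxy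
    · intro h1; exact absurd ⟨h1.1, h1.2.1, h1.2.2.1, h1.2.2.2.1⟩ hxy

-- goA preserves the grid's shape
theorem goARun_shaped (grid : List String) (n m : Int) :
    ∀ (K : Nat) (s : SGrid) (i : Nat), 9 * trueCount s + (8 - i) ≤ K →
      Shaped s n.toNat m.toNat → ∀ (r c ret : Int),
      Shaped (goARun grid n m r c i ret s).2 n.toNat m.toNat := by
  intro K
  induction K with
  | zero =>
    intro s i hK hs r c ret
    rw [goARun_base grid n m r c ret i s (by omega)]
    exact hs
  | succ K ih =>
    intro s i hK hs r c ret
    by_cases hi : 8 ≤ i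
    · rw [goARun_base grid n m r c ret i s hi]; exact hs
    · by_cases hg : (isValidA (r + rrOff.getD i 0) (c + ccOff.getD i 0) n m &&
          sget s (r + rrOff.getD i 0) (c + ccOff.getD i 0)) = true
      · rw [goARun_true grid n m r c ret i s hi hg]
        have hp := guardA_parts hg
        have hlt : trueCount (sset s (r + rrOff.getD i 0) (c + ccOff.getD i 0) false) < trueCount s :=
          trueCount_sset_false_lt hp.1 hp.2.1 hp.2.2.2.2
        have hs1 : Shaped (sset s (r + rrOff.getD i 0) (c + ccOff.getD i 0) false) n.toNat m.toNat :=
          shaped_sset hs _ _ _ hp.1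
        have hd : Shaped (goARun grid n m (r + rrOff.getD i 0) (c + ccOff.getD i 0) 0 1
            (sset s (r + rrOff.getD i 0) (c + ccOff.getD i 0) false)).2 n.toNat m.toNat :=
          ih _ 0 (by omega) hs1 _ _ _
        have hdle : trueCount (goARun grid n m (r + rrOff.getD i 0) (c + ccOff.getD i 0) 0 1
            (sset s (r + rrOff.getD i 0) (c + ccOff.getD i 0) false)).2 ≤
            trueCount (sset s (r + rrOff.getD i 0) (c + ccOff.getD i 0) false) :=
          goA_le _ grid n m _ 0 _ _ 1
        exact ih _ (i + 1) (by omega) hd _ _ _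
      · rw [goARun_false grid n m r c ret i s hi hg]
        exact ih s (i + 1) (by omega) hs r c ret

-- one stack frame of B's flood fill runs A's neighbour loop
theorem sim (grid : List String) (n m : Int) :
    ∀ (K : Nat) (s : SGrid) (L : List (Int × Int)) (i : Nat),
      9 * trueCount s + (8 - i) ≤ K → Shaped s n.toNat m.toNat → Corr n m s L →
      ∀ (cr cc : Int) (rest : List (Int × Int × Nat)) (cnt : Int),
        ∃ L', Corr n m (goARun grid n m cr cc i 0 s).2 L' ∧
          loopRun L ((cr, cc, i) :: rest) cnt =
            loopRun L' rest (cnt + (goARun grid n m cr cc i 0 s).1) := by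
  intro K
  induction K with
  | zero =>
    intro s L i hK hs hc cr cc rest cnt
    have hi : 8 ≤ i := by omega
    refine ⟨L, ?_, ?_⟩
    · rw [goARun_base grid n m cr cc 0 i s hi]; exact hc
    · rw [loopRun_pop L cr cc i rest cnt (by omega), goARun_base grid n m cr cc 0 i s hi]
      simp
  | succ K ih =>
    intro s L i hK hs hc cr cc rest cnt
    by_cases hi : i < 8
    · set nr := cr + (offs.getD i (0, 0)).1 with hnr
      set nc := cc + (offs.getD i (0, 0)).2 with hnc
      have hnr' : nr = cr + rrOff.getD i 0 := by rw [hnr, offs_fst]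
      have hnc' : nc = cc + ccOff.getD i 0 := by rw [hnc, offs_snd]
      by_cases hg : PySem.Set.contains L (nr, nc) = true
      · -- fresh neighbour
        have hgA : (isValidA (cr + rrOff.getD i 0) (cc + ccOff.getD i 0) n m &&
            sget s (cr + rrOff.getD i 0) (cc + ccOff.getD i 0)) = true := by
          rw [← hnr', ← hnc', ← corr_guard hc]; exact hg
        have hmem : (nr, nc) ∈ L := (PySem.Set.contains_iff _ _).mp hg
        have hparts := guardA_parts hgA
        rw [← hnr', ← hnc'] at hparts
        have hlt : trueCount (sset s nr nc false) < trueCount s :=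
          trueCount_sset_false_lt hparts.1 hparts.2.1 hparts.2.2.2.2
        rw [loopRun_true L cr cc i rest cnt hi hg]
        set s1 := sset s nr nc false with hs1def
        have hs1 : Shaped s1 n.toNat m.toNat := shaped_sset hs _ _ _ hparts.1
        have hc1 : Corr n m s1 (PySem.Set.discard L (nr, nc)) := corr_discard hs hc hmem
        obtain ⟨L1, hcL1, he1⟩ := ih s1 (PySem.Set.discard L (nr, nc)) 0 (by omega) hs1 hc1
          nr nc ((cr, cc, i + 1) :: rest) (cnt + 1)
        rw [he1]
        have hd2 : Shaped (goARun grid n m nr nc 0 0 s1).2 n.toNat m.toNat :=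
          goARun_shaped grid n m (9 * trueCount s1 + 8) s1 0 (by omega) hs1 nr nc 0
        have hgle : trueCount (goARun grid n m nr nc 0 0 s1).2 ≤ trueCount s1 :=
          goA_le _ grid n m s1 0 nr nc 0
        obtain ⟨L2, hcL2, he2⟩ := ih (goARun grid n m nr nc 0 0 s1).2 L1 (i + 1)
          (by omega) hd2 hcL1 cr cc rest (cnt + 1 + (goARun grid n m nr nc 0 0 s1).1)
        rw [he2]
        refine ⟨L2, ?_, ?_⟩
        · rw [goARun_true grid n m cr cc 0 i s (by omega) hgA]
          rw [← hnr', ← hnc']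
          rw [goARun_shift grid n m 8 0 (by omega) s1 nr nc 1]
          rw [goARun_shift grid n m 8 (i + 1) (by omega) (goARun grid n m nr nc 0 0 s1).2 cr cc
                (0 + (1 + (goARun grid n m nr nc 0 0 s1).1))]
          exact hcL2
        · rw [goARun_true grid n m cr cc 0 i s (by omega) hgA]
          rw [← hnr', ← hnc']
          rw [goARun_shift grid n m 8 0 (by omega) s1 nr nc 1]
          rw [goARun_shift grid n m 8 (i + 1) (by omega) (goARun grid n m nr nc 0 0 s1).2 cr cc
                (0 + (1 + (goARun grid n m nr nc 0 0 s1).1))]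
          congr 1
          omega
      · have hgA : ¬ (isValidA (cr + rrOff.getD i 0) (cc + ccOff.getD i 0) n m &&
            sget s (cr + rrOff.getD i 0) (cc + ccOff.getD i 0)) = true := by
          rw [← hnr', ← hnc', ← corr_guard hc]; exact hg
        rw [loopRun_false L cr cc i rest cnt hi hg]
        obtain ⟨L', hcL', he⟩ := ih s L (i + 1) (by omega) hs hc cr cc rest cnt
        rw [he, goARun_false grid n m cr cc 0 i s (by omega) hgA]
        exact ⟨L', hcL', rfl⟩
    · refine ⟨L, ?_, ?_⟩
      · rw [goARun_base grid n m cr cc 0 i s (by omega)]; exact hc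
      · rw [loopRun_pop L cr cc i rest cnt hi, goARun_base grid n m cr cc 0 i s (by omega)]
        simp

-- B's flood fill computes A's DFS count and keeps the correspondence
theorem flood_corr (grid : List String) (n m : Int) {s : SGrid} {L : List (Int × Int)}
    (hs : Shaped s n.toNat m.toNat) (hc : Corr n m s L) {r c : Int} (hmem : (r, c) ∈ L) :
    ∃ L', Corr n m (DFSa grid r c n m s).2 L' ∧ Shaped (DFSa grid r c n m s).2 n.toNat m.toNat ∧
      floodB L r c = ((DFSa grid r c n m s).1, L') := by
  have hb := (hc.2 r c).mp hmem
  have hs1 : Shaped (sset s r c false) n.toNat m.toNat := shaped_sset hs _ _ _ hb.1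
  have hc1 : Corr n m (sset s r c false) (PySem.Set.discard L (r, c)) := corr_discard hs hc hmem
  obtain ⟨L', hcL', he⟩ := sim grid n m (9 * trueCount (sset s r c false) + 8)
    (sset s r c false) (PySem.Set.discard L (r, c)) 0 (by omega) hs1 hc1 r c [] 1
  rw [DFSa_eq, floodB_eq]
  rw [he, loopRun_nil]
  rw [goARun_shift grid n m 8 0 (by omega) (sset s r c false) r c 1]
  exact ⟨L', hcL',
    goARun_shaped grid n m (9 * trueCount (sset s r c false) + 8) (sset s r c false) 0 (by omega) hs1 r c 0,
    rfl⟩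

-- membership and nodup of the set comprehension
theorem mem_condfold (grid : List String) (n m : Int) (r : Int) :
    ∀ (cs : List Int) (L : List (Int × Int)) (y : Int × Int),
      (y ∈ cs.foldl (fun L c => if condB grid n m r c then PySem.Set.add L (r, c) else L) L ↔
        y ∈ L ∨ ∃ c ∈ cs, condB grid n m r c = true ∧ y = (r, c)) := by
  intro cs
  induction cs with
  | nil => intro L y; simp
  | cons c cs ih =>
    intro L y
    rw [List.foldl_cons]
    by_cases h : condB grid n m r c = true
    · rw [if_pos h, ih, PySem.Set.mem_add]
      simp only [List.mem_cons]
      constructor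
      · rintro ((h1 | h1) | ⟨c', hc', h2, h3⟩)
        · exact Or.inl h1
        · exact Or.inr ⟨c, Or.inl rfl, h, h1⟩
        · exact Or.inr ⟨c', Or.inr hc', h2, h3⟩
      · rintro (h1 | ⟨c', (hc' | hc'), h2, h3⟩)
        · exact Or.inl (Or.inl h1)
        · subst hc'; exact Or.inl (Or.inr h3)
        · exact Or.inr ⟨c', hc', h2, h3⟩
    · rw [if_neg h, ih]
      simp only [List.mem_cons]
      constructor
      · rintro (h1 | ⟨c', hc', h2, h3⟩)
        · exact Or.inl h1
        · exact Or.inr ⟨c', Or.inr hc', h2, h3⟩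
      · rintro (h1 | ⟨c', (hc' | hc'), h2, h3⟩)
        · exact Or.inl h1
        · subst hc'; exact absurd h2 h
        · exact Or.inr ⟨c', hc', h2, h3⟩

theorem nodup_condfold (grid : List String) (n m : Int) (r : Int) :
    ∀ (cs : List Int) (L : List (Int × Int)), L.Nodup →
      (cs.foldl (fun L c => if condB grid n m r c then PySem.Set.add L (r, c) else L) L).Nodup := by
  intro cs
  induction cs with
  | nil => intro L h; simpa using h
  | cons c cs ih =>
    intro L h
    rw [List.foldl_cons]
    by_cases hg : condB grid n m r c = true
    · rw [if_pos hg]; exact ih _ (PySem.Set.nodup_add _ _ h)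
    · rw [if_neg hg]; exact ih _ h

theorem mem_liveB (grid : List String) (n m : Int) (a b : Int) :
    ((a, b) ∈ liveB grid n m ↔
      0 ≤ a ∧ a < n ∧ 0 ≤ b ∧ b < m ∧ condB grid n m a b = true) := by
  unfold liveB
  have outer : ∀ (rs : List Int) (L : List (Int × Int)),
      ((a, b) ∈ rs.foldl (fun L r => (PySem.List.pyRange 0 m 1).foldl
          (fun L c => if condB grid n m r c then PySem.Set.add L (r, c) else L) L) L ↔
        (a, b) ∈ L ∨ ∃ r ∈ rs, ∃ c ∈ PySem.List.pyRange 0 m 1,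
          condB grid n m r c = true ∧ (a, b) = (r, c)) := by
    intro rs
    induction rs with
    | nil => intro L; simp
    | cons r rs ih =>
      intro L
      rw [List.foldl_cons, ih]
      rw [show ((a, b) ∈ (PySem.List.pyRange 0 m 1).foldl
          (fun L c => if condB grid n m r c then PySem.Set.add L (r, c) else L) L ↔ _) from
        mem_condfold grid n m r (PySem.List.pyRange 0 m 1) L (a, b)]
      simp only [List.mem_cons]
      constructor
      · rintro ((h1 | ⟨c', hc', h2, h3⟩) | ⟨r', hr', h1⟩)
        · exact Or.inl h1
        · exact Or.inr ⟨r, Or.inl rfl, c', hc', h2, h3⟩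
        · exact Or.inr ⟨r', Or.inr hr', h1⟩
      · rintro (h1 | ⟨r', (hr' | hr'), h1⟩)
        · exact Or.inl (Or.inl h1)
        · subst hr'; exact Or.inl (Or.inr h1)
        · exact Or.inr ⟨r', hr', h1⟩
  rw [outer]
  simp only [PySem.Set.empty, List.not_mem_nil, false_or, PySem.List.mem_pyRange_one]
  constructor
  · rintro ⟨r, ⟨hr0, hrn⟩, c, ⟨hc0, hcm⟩, hcond, he⟩
    rw [Prod.mk.injEq] at he
    obtain ⟨e1, e2⟩ := he
    subst e1; subst e2
    exact ⟨hr0, hrn, hc0, hcm, hcond⟩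
  · rintro ⟨h1, h2, h3, h4, h5⟩
    exact ⟨a, ⟨h1, h2⟩, b, ⟨h3, h4⟩, h5, rfl⟩

theorem nodup_liveB (grid : List String) (n m : Int) : (liveB grid n m).Nodup := by
  unfold liveB
  have : ∀ (rs : List Int) (L : List (Int × Int)), L.Nodup →
      (rs.foldl (fun L r => (PySem.List.pyRange 0 m 1).foldl
          (fun L c => if condB grid n m r c then PySem.Set.add L (r, c) else L) L) L).Nodup := by
    intro rs
    induction rs with
    | nil => intro L h; simpa using h
    | cons r rs ih =>
      intro L h
      rw [List.foldl_cons]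
      exact ih _ (nodup_condfold grid n m r _ L h)
  exact this _ _ List.nodup_nil

theorem corr_init (grid : List String) (n m : Int) :
    Corr n m (spiritualA grid n m) (liveB grid n m) := by
  refine ⟨nodup_liveB grid n m, ?_⟩
  intro a b
  rw [mem_liveB]
  by_cases hab : 0 ≤ a ∧ a < n ∧ 0 ≤ b ∧ b < m
  · have ea : ((a.toNat : Int)) = a := by omega
    have eb : ((b.toNat : Int)) = b := by omega
    rw [sget_eq_cell _ a b hab.1 hab.2.2.1,
        cond_eq grid n m a.toNat b.toNat (by omega) (by omega), ea, eb]
  · constructor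
    · rintro ⟨h1, h2, h3, h4, _⟩; exact absurd ⟨h1, h2, h3, h4⟩ hab
    · rintro ⟨h1, h2, h3, h4, _⟩; exact absurd ⟨h1, h2, h3, h4⟩ hab

-- the double scan: B's fold over the set mirrors A's fold over the grid
theorem innerSim (grid : List String) (n m : Int) (r : Int) (hr : 0 ≤ r ∧ r < n) :
    ∀ (cs : List Int), (∀ c ∈ cs, 0 ≤ c ∧ c < m) →
    ∀ (v : Int) (s : SGrid) (L : List (Int × Int)), Shaped s n.toNat m.toNat → Corr n m s L →
      ∃ L', Corr n m (cs.foldl (fun (p : Int × SGrid) c =>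
          if sget p.2 r c then (max p.1 (DFSa grid r c n m p.2).1, (DFSa grid r c n m p.2).2)
          else p) (v, s)).2 L' ∧
        Shaped (cs.foldl (fun (p : Int × SGrid) c =>
          if sget p.2 r c then (max p.1 (DFSa grid r c n m p.2).1, (DFSa grid r c n m p.2).2)
          else p) (v, s)).2 n.toNat m.toNat ∧
        cs.foldl (fun (p : Int × PySem.Set (Int × Int)) c =>
          if PySem.Set.contains p.2 (r, c) then (max p.1 (floodB p.2 r c).1, (floodB p.2 r c).2)
          else p) (v, L) =
        ((cs.foldl (fun (p : Int × SGrid) c =>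
          if sget p.2 r c then (max p.1 (DFSa grid r c n m p.2).1, (DFSa grid r c n m p.2).2)
          else p) (v, s)).1, L') := by
  intro cs
  induction cs with
  | nil =>
    intro _ v s L hs hc
    exact ⟨L, hc, hs, rfl⟩
  | cons c cs ih =>
    intro hcs v s L hs hc
    have hcb := hcs c List.mem_cons_self
    simp only [List.foldl_cons]
    have hguard : PySem.Set.contains L (r, c) = sget s r c := by
      rw [corr_guard hc r c]
      have : isValidA r c n m = true := by
        simp only [isValidA, Bool.and_eq_true, decide_eq_true_eq, ge_iff_le]
        exact ⟨⟨⟨hr.1, hcb.1⟩, hr.2⟩, hcb.2⟩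
      rw [this, Bool.true_and]
    by_cases hg : sget s r c = true
    · rw [hguard, hg]
      have hmem : (r, c) ∈ L := (hc.2 r c).mpr ⟨hr.1, hr.2, hcb.1, hcb.2, hg⟩
      obtain ⟨L1, hc1, hs1, he1⟩ := flood_corr grid n m hs hc hmem
      rw [he1]
      exact ih (fun c' hc' => hcs c' (List.mem_cons_of_mem _ hc')) _ _ _ hs1 hc1
    · rw [hguard, Bool.not_eq_true] at *
      rw [hg]
      simp only [Bool.false_eq_true, if_false]
      exact ih (fun c' hc' => hcs c' (List.mem_cons_of_mem _ hc')) v s L hs hc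

theorem outerSim (grid : List String) (n m : Int) :
    ∀ (rs : List Int), (∀ r ∈ rs, 0 ≤ r ∧ r < n) →
    ∀ (v : Int) (s : SGrid) (L : List (Int × Int)), Shaped s n.toNat m.toNat → Corr n m s L →
      (rs.foldl (fun (p : Int × PySem.Set (Int × Int)) r =>
          (PySem.List.pyRange 0 m 1).foldl (fun (p : Int × PySem.Set (Int × Int)) c =>
            if PySem.Set.contains p.2 (r, c) then (max p.1 (floodB p.2 r c).1, (floodB p.2 r c).2)
            else p) p) (v, L)).1 =
      (rs.foldl (fun (p : Int × SGrid) r =>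
          (PySem.List.pyRange 0 m 1).foldl (fun (p : Int × SGrid) c =>
            if sget p.2 r c then (max p.1 (DFSa grid r c n m p.2).1, (DFSa grid r c n m p.2).2)
            else p) p) (v, s)).1 := by
  intro rs
  induction rs with
  | nil => intro _ v s L _ _; rfl
  | cons r rs ih =>
    intro hrs v s L hs hc
    simp only [List.foldl_cons]
    obtain ⟨L1, hc1, hs1, he1⟩ := innerSim grid n m r (hrs r List.mem_cons_self)
      (PySem.List.pyRange 0 m 1)
      (fun c hcmem => by
        have := (PySem.List.mem_pyRange_one).mp hcmem
        exact ⟨this.1, this.2⟩)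
      v s L hs hc
    rw [he1]
    exact ih (fun r' hr' => hrs r' (List.mem_cons_of_mem _ hr')) _ _ _ hs1 hc1

-- ===== VERDICT (by name: the statement is the Claim_ definition above) =====
theorem maxCities_spec : Claim_equal_maxCities := by
  intro grid n m _ _
  show maxCities grid n m = maxCities_alt grid n m
  unfold maxCities maxCities_alt
  rw [outerSim grid n m (PySem.List.pyRange 0 n 1)
        (fun r hr => by
          have := (PySem.List.mem_pyRange_one).mp hr
          exact ⟨this.1, this.2⟩)
        0 (spiritualA grid n m) (liveB grid n m)
        (shaped_spiritualA grid n m) (corr_init grid n m)]
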